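-- pv_equiv track=rewrite | github.com/ngelecheikiprop/challenges-for-preparation | 7-challenge.py | TreeConstructor
-- ===== SOURCE A (Python) =====
-- def TreeConstructor(strArr):
--   for i in range(10):
--     child_count = 0
--     for item in strArr:
--       if str(i) == item.split(',')[1][:-1]:
--         child_count += 1
--     if child_count > 2:
--       return 'false'
--   for i in range(10):
--     parent_count = 0
--     for item in strArr:
--       if str(i) == item.split(',')[0][1:]:
--         parent_count += 1
--     if parent_count > 1:
--       return 'false'
--   return 'true'
-- ===== SOURCE B (Python) =====
-- def TreeConstructor(strArr):
--     child_counts = {}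
--     parent_counts = {}
--     for item in strArr:
--         parts = item.split(',')
--         child = parts[1][:-1]
--         parent = parts[0][1:]
--         child_counts[child] = child_counts.get(child, 0) + 1
--         parent_counts[parent] = parent_counts.get(parent, 0) + 1
--     for i in range(10):
--         d = str(i)
--         if child_counts.get(d, 0) > 2 or parent_counts.get(d, 0) > 1:
--             return 'false'
--     return 'true'
-- ===== Notes on version B (the rewrite author's own statement) =====
-- stated objective: faster
-- what changed: B splits each item once in a single pass, accumulating child/parent counts in two dicts, then checks the ten digit labels against the dicts, instead of A's 20 full scans of strArr (one per digit per role) with two splits per item each scan.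
import Mathlib
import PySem

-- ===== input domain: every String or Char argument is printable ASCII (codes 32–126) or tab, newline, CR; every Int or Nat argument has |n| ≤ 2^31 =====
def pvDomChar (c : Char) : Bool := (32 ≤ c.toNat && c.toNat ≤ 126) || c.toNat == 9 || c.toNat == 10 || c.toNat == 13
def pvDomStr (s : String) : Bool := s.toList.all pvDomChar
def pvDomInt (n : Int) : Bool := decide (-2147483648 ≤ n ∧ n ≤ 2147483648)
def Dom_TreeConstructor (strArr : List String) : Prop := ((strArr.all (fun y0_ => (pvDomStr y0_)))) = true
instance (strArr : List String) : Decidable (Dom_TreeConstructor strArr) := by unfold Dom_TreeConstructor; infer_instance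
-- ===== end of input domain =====

-- B replaces A's 20 full scans of strArr (one per digit per role, splitting each item
-- every time) with ONE pass that splits each item once and counts children/parents in
-- two dicts, then checks the ten digit labels against the dicts (objective: faster).

-- ===== PORT A =====
-- item.split(',')[1][:-1]  (Pre_ guarantees index 1 exists; the default "" is never used there)
def tcChildA (item : String) : String :=
  PySem.Str.slice (PySem.List.pyGetD ((PySem.Str.split? item ",").getD []) 1 "") none (some (-1))
-- item.split(',')[0][1:]
def tcParentA (item : String) : String :=
  PySem.Str.slice (PySem.List.pyGetD ((PySem.Str.split? item ",").getD []) 0 "") (some 1) none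

def TreeConstructor (strArr : List String) : String :=
  if (PySem.List.pyRange 0 10 1).any (fun i =>
      decide ((strArr.foldl (fun c item =>
        if PySem.Int.toStr i = tcChildA item then c + 1 else c) (0 : Int)) > 2))
  then "false"
  else if (PySem.List.pyRange 0 10 1).any (fun i =>
      decide ((strArr.foldl (fun c item =>
        if PySem.Int.toStr i = tcParentA item then c + 1 else c) (0 : Int)) > 1))
  then "false"
  else "true"

-- ===== PORT B =====
-- parts = item.split(','); returns (child, parent) = (parts[1][:-1], parts[0][1:])
def tcPartsB (item : String) : String × String :=
  let parts := (PySem.Str.split? item ",").getD []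
  (PySem.Str.slice (PySem.List.pyGetD parts 1 "") none (some (-1)),
   PySem.Str.slice (PySem.List.pyGetD parts 0 "") (some 1) none)

def TreeConstructor_alt (strArr : List String) : String :=
  let st := strArr.foldl
    (fun (st : PySem.Dict String Int × PySem.Dict String Int) item =>
      let p := tcPartsB item
      (st.1.insert p.1 (st.1.getD p.1 0 + 1), st.2.insert p.2 (st.2.getD p.2 0 + 1)))
    (PySem.Dict.empty, PySem.Dict.empty)
  if (PySem.List.pyRange 0 10 1).any (fun i =>
      let d := PySem.Int.toStr i
      decide (st.1.getD d 0 > 2) || decide (st.2.getD d 0 > 1))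
  then "false"
  else "true"

-- ===== PRECONDITION & SPEC =====
-- A (and B) raise IndexError on any item without a comma (split(',')[1]); Pre_ excludes exactly those.
def Pre_TreeConstructor (strArr : List String) : Prop := ∀ s ∈ strArr, ',' ∈ s.toList
instance (strArr : List String) : Decidable (Pre_TreeConstructor strArr) := by
  unfold Pre_TreeConstructor; infer_instance
def pvWitness_TreeConstructor : List String := ["(1,2)", "(2,3)"]

def Spec_TreeConstructor (strArr : List String) (out : String) : Prop := out = TreeConstructor_alt strArr
instance (strArr : List String) (out : String) : Decidable (Spec_TreeConstructor strArr out) := by unfold Spec_TreeConstructor; infer_instance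

-- ===== CLAIM (what is proved, stated in full; the proofs are below) =====
def Claim_equal_TreeConstructor : Prop := ∀ (strArr : List String), Dom_TreeConstructor strArr → Pre_TreeConstructor strArr → Spec_TreeConstructor strArr (TreeConstructor strArr)

-- ===== LEMMAS AND PROOFS =====

-- B's pair-fold splits into two independent counter folds over the mapped key lists.
theorem tc_fold_pair (l : List String) (d1 d2 : PySem.Dict String Int) :
    l.foldl
      (fun (st : PySem.Dict String Int × PySem.Dict String Int) item =>
        let p := tcPartsB item
        (st.1.insert p.1 (st.1.getD p.1 0 + 1), st.2.insert p.2 (st.2.getD p.2 0 + 1)))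
      (d1, d2)
    = ((l.map (fun it => (tcPartsB it).1)).foldl (fun d k => d.insert k (d.getD k 0 + 1)) d1,
       (l.map (fun it => (tcPartsB it).2)).foldl (fun d k => d.insert k (d.getD k 0 + 1)) d2) := by
  induction l generalizing d1 d2 with
  | nil => rfl
  | cons x xs ih => simpa using ih _ _

-- A's counting loop is a countP over the same mapped key list.
theorem tc_count_eq (l : List String) (f : String → String) (v : String) :
    (l.foldl (fun c item => if v = f item then c + 1 else c) (0 : Int))
      = ((l.map f).count v : Int) := by
  rw [← List.foldl_map (f := f) (g := fun c k => if v = k then c + 1 else c)]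
  have := PySem.List.foldl_count_if (fun k => v == k) (l.map f) 0
  simp only [beq_iff_eq] at this
  rw [this]
  simp only [zero_add, List.count, List.countP_map, Int.natCast_inj]
  exact List.countP_congr fun a _ => by simp only [Function.comp_apply]; rw [Bool.beq_comm]

theorem tc_any_or (l : List Int) (p q : Int → Bool) :
    (l.any fun i => p i || q i) = (l.any p || l.any q) := by
  induction l with
  | nil => rfl
  | cons x xs ih => cases hp : p x <;> cases hq : q x <;> simp [List.any_cons, hp, hq, ih]

theorem tc_if_shape (a b : Bool) (x y : String) :
    (if a then x else if b then x else y) = (if (a || b) then x else y) := by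
  cases a <;> cases b <;> simp

-- ===== VERDICT (by name: the statement is the Claim_ definition above) =====
theorem TreeConstructor_spec : Claim_equal_TreeConstructor := by
  intro strArr _ _
  unfold Spec_TreeConstructor TreeConstructor TreeConstructor_alt
  rw [tc_fold_pair]
  have hc : ∀ i : Int,
      (strArr.foldl (fun c item => if PySem.Int.toStr i = tcChildA item then c + 1 else c) (0 : Int))
        = ((strArr.map (fun it => (tcPartsB it).1)).foldl
            (fun d k => d.insert k (d.getD k 0 + 1)) PySem.Dict.empty).getD (PySem.Int.toStr i) 0 := by
    intro i
    rw [PySem.Dict.getD_foldl_insert_add_one, tc_count_eq]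
    simp only [PySem.Dict.getD_empty, zero_add]
    rfl
  have hp : ∀ i : Int,
      (strArr.foldl (fun c item => if PySem.Int.toStr i = tcParentA item then c + 1 else c) (0 : Int))
        = ((strArr.map (fun it => (tcPartsB it).2)).foldl
            (fun d k => d.insert k (d.getD k 0 + 1)) PySem.Dict.empty).getD (PySem.Int.toStr i) 0 := by
    intro i
    rw [PySem.Dict.getD_foldl_insert_add_one, tc_count_eq]
    simp only [PySem.Dict.getD_empty, zero_add]
    rfl
  simp only [hc, hp]
  rw [tc_any_or]
  exact tc_if_shape _ _ _ _
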